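-- pv_equiv track=rewrite | github.com/MegaGiciorPortas/WDI-Zadania | 02-tablice_jednowymiarowe/2.80.py | func
-- ===== SOURCE A (Python) =====
-- def czy_pierwsza(n):
--     if n <= 1:
--         return False
--     if n <= 3:
--         return True
--     if n % 2 == 0 or n % 3 == 0:
--         return False
--     i = 5
--     while i * i <= n:
--         if n % i == 0:
--             return False
--         i += 2
--         if n % i == 0:
--             return False
--         i += 4
--     return True
--
-- def func(T1, T2):
--     aktualne_sumy = {T1[0], T2[0], T1[0] + T2[0]}
--
--     for i in range(1, len(T1)):
--         possible_sums = [T1[i], T2[i], T1[i] + T2[i]]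
--         new_sums = set()
--
--         for s in possible_sums:
--             for v in aktualne_sumy:
--                 new_sums.add(s + v)
--         aktualne_sumy = new_sums
--
--     licznik = 0
--     for x in aktualne_sumy:
--         if czy_pierwsza(x):
--             licznik += 1
--
--     return licznik
-- ===== SOURCE B (Python) =====
-- def czy_pierwsza(n):
--     if n <= 1:
--         return False
--     if n <= 3:
--         return True
--     if n % 2 == 0 or n % 3 == 0:
--         return False
--     i = 5
--     while i * i <= n:
--         if n % i == 0:
--             return False
--         i += 2
--         if n % i == 0:
--             return False
--         i += 4
--     return True
--
--
-- def all_sums(cols):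
--     # every sum obtainable by picking one option from each column, recursively
--     if not cols:
--         return [0]
--     a, b, ab = cols[0]
--     tails = all_sums(cols[1:])
--     return [c + r for c in (a, b, ab) for r in tails]
--
--
-- def func(T1, T2):
--     choices = [(T1[i], T2[i], T1[i] + T2[i]) for i in range(len(T1))]
--     sums = set(all_sums(choices))
--     licznik = 0
--     for x in sums:
--         if czy_pierwsza(x):
--             licznik += 1
--     return licznik
-- ===== Notes on version B (the rewrite author's own statement) =====
-- stated objective: alternative
-- what changed: Replaces A's incremental reachable-set DP (a set of partial sums updated column by column with nested add-loops) by a recursive direct enumeration: build the per-column choice triples once, recursively enumerate every one-pick-per-column combination sum, dedupe the whole list into one set and count primes.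
-- crash fix: On empty T1 A raises IndexError (T1[0]) while B returns 0, the prime count over the single empty-combination sum 0. — e.g. on func([], []): A raises IndexError, B returns 0
import Mathlib
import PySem

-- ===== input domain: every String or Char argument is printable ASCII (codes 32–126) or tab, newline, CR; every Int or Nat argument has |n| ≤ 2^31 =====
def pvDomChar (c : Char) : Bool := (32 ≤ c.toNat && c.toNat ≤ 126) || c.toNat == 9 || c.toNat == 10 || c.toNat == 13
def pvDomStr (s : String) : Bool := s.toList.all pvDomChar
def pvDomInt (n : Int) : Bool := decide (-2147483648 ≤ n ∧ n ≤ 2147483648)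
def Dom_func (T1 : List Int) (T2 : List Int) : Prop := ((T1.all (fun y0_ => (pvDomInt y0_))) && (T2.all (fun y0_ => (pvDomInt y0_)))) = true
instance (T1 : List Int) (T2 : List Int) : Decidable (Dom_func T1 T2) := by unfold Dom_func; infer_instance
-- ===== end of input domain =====

-- B replaces A's column-by-column reachable-set DP by a recursive direct enumeration of every
-- one-pick-per-column combination sum, deduped once into a set; same result, different algorithm.

-- ===== PORT A =====
-- shared helper czy_pierwsza (identical in Source A and Source B)
def czyPierwszaLoop (n : Int) (i : Int) : Bool :=
  if h : i * i ≤ n then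
    if PySem.Int.mod n i == 0 then false
    else if PySem.Int.mod n (i + 2) == 0 then false
    else czyPierwszaLoop n (i + 6)
  else true
termination_by (n + 6 - i).toNat
decreasing_by
  have hii : i ≤ i * i := by nlinarith [mul_self_nonneg (i - 1), mul_self_nonneg i]
  omega

def czyPierwsza (n : Int) : Bool :=
  if n ≤ 1 then false
  else if n ≤ 3 then true
  else if PySem.Int.mod n 2 == 0 || PySem.Int.mod n 3 == 0 then false
  else czyPierwszaLoop n 5

def func (T1 : List Int) (T2 : List Int) : Int :=
  -- aktualne_sumy = {T1[0], T2[0], T1[0] + T2[0]}  (indices valid under Pre_; getD 0 is junk outside)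
  let a0 := (PySem.List.pyGet? T1 0).getD 0
  let b0 := (PySem.List.pyGet? T2 0).getD 0
  let init : PySem.Set Int := PySem.Set.ofList [a0, b0, a0 + b0]
  let finalSet : PySem.Set Int :=
    (PySem.List.pyRange 1 (T1.length : Int) 1).foldl (fun acc i =>
      let s1 := (PySem.List.pyGet? T1 i).getD 0
      let s2 := (PySem.List.pyGet? T2 i).getD 0
      [s1, s2, s1 + s2].foldl (fun ns s =>
        acc.foldl (fun ns v => PySem.Set.add ns (s + v)) ns) PySem.Set.empty) init
  finalSet.foldl (fun licznik x => if czyPierwsza x then licznik + 1 else licznik) 0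

-- ===== PORT B =====
-- all_sums(cols): recursive enumeration of every one-pick-per-column combination sum
def allSumsB : List (Int × Int × Int) → List Int
  | [] => [0]
  | (a, b, ab) :: rest => [a, b, ab].flatMap (fun c => (allSumsB rest).map (fun r => c + r))

def func_alt (T1 : List Int) (T2 : List Int) : Int :=
  let choices : List (Int × Int × Int) :=
    (PySem.List.pyRange 0 (T1.length : Int) 1).map (fun i =>
      ((PySem.List.pyGet? T1 i).getD 0, (PySem.List.pyGet? T2 i).getD 0,
       (PySem.List.pyGet? T1 i).getD 0 + (PySem.List.pyGet? T2 i).getD 0))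
  let sums : PySem.Set Int := PySem.Set.ofList (allSumsB choices)
  sums.foldl (fun licznik x => if czyPierwsza x then licznik + 1 else licznik) 0

-- ===== PRECONDITION & SPEC =====
-- Pre_ excludes exactly the inputs where the Python A raises IndexError: empty T1 (T1[0]) or T2 shorter than T1.
def Pre_func (T1 : List Int) (T2 : List Int) : Prop := T1 ≠ [] ∧ T1.length ≤ T2.length
instance (T1 : List Int) (T2 : List Int) : Decidable (Pre_func T1 T2) := by unfold Pre_func; infer_instance

def pvWitness_func : List Int × List Int := ([2, 3], [4, 5])

-- On empty T1 A raises IndexError (T1[0]) while B returns 0, the prime count over the single empty-combination sum 0.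
def Raises_func (T1 : List Int) (T2 : List Int) : Prop := T1 = []
instance (T1 : List Int) (T2 : List Int) : Decidable (Raises_func T1 T2) := by unfold Raises_func; infer_instance
def pvRaiseWitness_func : List Int × List Int := ([], [])
def pvRaiseWitnessOut_func : Int := 0

def Spec_func (T1 : List Int) (T2 : List Int) (out : Int) : Prop := out = func_alt T1 T2
instance (T1 : List Int) (T2 : List Int) (out : Int) : Decidable (Spec_func T1 T2 out) := by unfold Spec_func; infer_instance

-- ===== CLAIM (what is proved, stated in full; the proofs are below) =====
def Claim_equal_func : Prop := ∀ (T1 : List Int) (T2 : List Int), Dom_func T1 T2 → Pre_func T1 T2 → Spec_func T1 T2 (func T1 T2)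
def Claim_raises_func : Prop := (∀ (T1 : List Int) (T2 : List Int), Dom_func T1 T2 → Raises_func T1 T2 → ¬ Pre_func T1 T2) ∧ (Dom_func (pvRaiseWitness_func.1) (pvRaiseWitness_func.2) ∧ Raises_func (pvRaiseWitness_func.1) (pvRaiseWitness_func.2) ∧ func_alt (pvRaiseWitness_func.1) (pvRaiseWitness_func.2) = pvRaiseWitnessOut_func)

-- ===== LEMMAS AND PROOFS =====

-- the per-column choice list (as A sees it)
def pcol (T1 T2 : List Int) (i : Int) : List Int :=
  [(PySem.List.pyGet? T1 i).getD 0, (PySem.List.pyGet? T2 i).getD 0,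
   (PySem.List.pyGet? T1 i).getD 0 + (PySem.List.pyGet? T2 i).getD 0]

-- proof-only list-of-lists version of the enumeration
def allSums : List (List Int) → List Int
  | [] => [0]
  | c :: rest => c.flatMap (fun x => (allSums rest).map (fun y => x + y))

def tripToList (t : Int × Int × Int) : List Int := [t.1, t.2.1, t.2.2]

lemma allSumsB_eq (L : List (Int × Int × Int)) :
    allSumsB L = allSums (L.map tripToList) := by
  induction L with
  | nil => rfl
  | cons t rest ih => obtain ⟨a, b, ab⟩ := t; simp [allSumsB, allSums, tripToList, ih]

-- A's inner step: new_sums from one column and the current set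
def stepA (acc : PySem.Set Int) (c : List Int) : PySem.Set Int :=
  c.foldl (fun ns s => acc.foldl (fun ns v => PySem.Set.add ns (s + v)) ns) PySem.Set.empty

lemma mem_inner_foldl (acc : List Int) (s : Int) (ns : PySem.Set Int) (x : Int) :
    x ∈ acc.foldl (fun ns v => PySem.Set.add ns (s + v)) ns ↔ x ∈ ns ∨ ∃ v ∈ acc, x = s + v := by
  induction acc generalizing ns with
  | nil => simp
  | cons a t ih => simp [ih, PySem.Set.mem_add, or_assoc]

lemma nodup_inner_foldl (acc : List Int) (s : Int) (ns : PySem.Set Int) (h : ns.Nodup) :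
    (acc.foldl (fun ns v => PySem.Set.add ns (s + v)) ns).Nodup := by
  induction acc generalizing ns with
  | nil => exact h
  | cons a t ih => exact ih _ (PySem.Set.nodup_add _ _ h)

lemma mem_stepA (acc : PySem.Set Int) (c : List Int) (x : Int) :
    x ∈ stepA acc c ↔ ∃ s ∈ c, ∃ v ∈ acc, x = s + v := by
  unfold stepA
  have gen : ∀ (c : List Int) (ns : PySem.Set Int),
      x ∈ c.foldl (fun ns s => acc.foldl (fun ns v => PySem.Set.add ns (s + v)) ns) ns ↔
        x ∈ ns ∨ ∃ s ∈ c, ∃ v ∈ acc, x = s + v := by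
    intro c
    induction c with
    | nil => simp
    | cons s t ih => intro ns; simp [ih, mem_inner_foldl, or_assoc]
  simp [gen]

lemma nodup_stepA (acc : PySem.Set Int) (c : List Int) : (stepA acc c).Nodup := by
  unfold stepA
  have gen : ∀ (c : List Int) (ns : PySem.Set Int), ns.Nodup →
      (c.foldl (fun ns s => acc.foldl (fun ns v => PySem.Set.add ns (s + v)) ns) ns).Nodup := by
    intro c
    induction c with
    | nil => exact fun _ h => h
    | cons s t ih => exact fun ns h => ih _ (nodup_inner_foldl _ _ _ h)
  exact gen _ _ (by simp [PySem.Set.empty])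

lemma mem_allSums_cons (c : List Int) (rest : List (List Int)) (x : Int) :
    x ∈ allSums (c :: rest) ↔ ∃ s ∈ c, ∃ r ∈ allSums rest, x = s + r := by
  simp [allSums, eq_comm]

-- A's fold over any column list equals the combination sums of those columns
lemma mem_foldA (cols : List (List Int)) (init : PySem.Set Int) (x : Int) :
    x ∈ cols.foldl stepA init ↔ ∃ r ∈ allSums cols, ∃ v ∈ init, x = v + r := by
  induction cols generalizing init with
  | nil => simp [allSums]
  | cons c t ih =>
    simp only [List.foldl_cons, ih, mem_stepA, mem_allSums_cons]
    constructor
    · rintro ⟨r, hr, v, ⟨s, hs, w, hw, rfl⟩, rfl⟩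
      exact ⟨s + r, ⟨s, hs, r, hr, rfl⟩, w, hw, by ring⟩
    · rintro ⟨r', ⟨s, hs, r, hr, rfl⟩, w, hw, rfl⟩
      exact ⟨r, hr, s + w, ⟨s, hs, w, hw, rfl⟩, by ring⟩

lemma nodup_foldA (cols : List (List Int)) (init : PySem.Set Int) (h : init.Nodup) :
    (cols.foldl stepA init).Nodup := by
  induction cols generalizing init with
  | nil => exact h
  | cons c t ih => exact ih _ (nodup_stepA _ _)

lemma mem_foldA' (col : Int → List Int) (L : List Int) (init : PySem.Set Int) (x : Int) :
    x ∈ L.foldl (fun acc i => stepA acc (col i)) init ↔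
      ∃ r ∈ allSums (L.map col), ∃ v ∈ init, x = v + r := by
  rw [← List.foldl_map]
  exact mem_foldA _ _ _

lemma nodup_foldA' (col : Int → List Int) (L : List Int) (init : PySem.Set Int) (h : init.Nodup) :
    (L.foldl (fun acc i => stepA acc (col i)) init).Nodup := by
  rw [← List.foldl_map]
  exact nodup_foldA _ _ h

lemma count_eq_of_same_mem (l1 l2 : List Int) (h1 : l1.Nodup) (h2 : l2.Nodup)
    (hm : ∀ x, x ∈ l1 ↔ x ∈ l2) :
    l1.foldl (fun k x => if czyPierwsza x then k + 1 else k) (0 : Int) =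
      l2.foldl (fun k x => if czyPierwsza x then k + 1 else k) (0 : Int) := by
  have hperm : l1.Perm l2 :=
    List.perm_of_nodup_nodup_toFinset_eq h1 h2 (by ext x; simp [hm x])
  simp only [PySem.List.foldl_count_if, hperm.countP_eq]

-- ===== VERDICT (by name: the statement is the Claim_ definition above) =====
theorem func_spec : Claim_equal_func := by
  intro T1 T2 _ hpre
  obtain ⟨hne, _⟩ := hpre
  have hlen : (0 : Int) < (T1.length : Int) := by
    have : T1.length ≠ 0 := by simpa using hne
    omega
  have hrange : PySem.List.pyRange 0 (T1.length : Int) 1 =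
      0 :: PySem.List.pyRange 1 (T1.length : Int) 1 := by
    simpa using PySem.List.pyRange_one_cons (a := 0) (b := (T1.length : Int)) hlen
  unfold Spec_func func func_alt
  show ((PySem.List.pyRange 1 (T1.length : Int) 1).foldl
      (fun acc i => stepA acc (pcol T1 T2 i)) (PySem.Set.ofList (pcol T1 T2 0))).foldl
        (fun licznik x => if czyPierwsza x then licznik + 1 else licznik) 0 =
    (PySem.Set.ofList (allSumsB ((PySem.List.pyRange 0 (T1.length : Int) 1).map (fun i =>
        ((PySem.List.pyGet? T1 i).getD 0, (PySem.List.pyGet? T2 i).getD 0,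
         (PySem.List.pyGet? T1 i).getD 0 + (PySem.List.pyGet? T2 i).getD 0))))).foldl
        (fun licznik x => if czyPierwsza x then licznik + 1 else licznik) 0
  apply count_eq_of_same_mem
  · exact nodup_foldA' _ _ _ (PySem.Set.nodup_ofList _)
  · exact PySem.Set.nodup_ofList _
  · intro x
    rw [mem_foldA', PySem.Set.mem_ofList, allSumsB_eq, List.map_map]
    have hcols : (PySem.List.pyRange 0 (T1.length : Int) 1).map
        (tripToList ∘ fun i => ((PySem.List.pyGet? T1 i).getD 0, (PySem.List.pyGet? T2 i).getD 0,
          (PySem.List.pyGet? T1 i).getD 0 + (PySem.List.pyGet? T2 i).getD 0)) =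
        pcol T1 T2 0 :: (PySem.List.pyRange 1 (T1.length : Int) 1).map (pcol T1 T2) := by
      rw [hrange]; rfl
    rw [hcols, mem_allSums_cons]
    simp only [PySem.Set.mem_ofList]
    constructor
    · rintro ⟨r, hr, v, hv, rfl⟩
      exact ⟨v, hv, r, hr, by ring⟩
    · rintro ⟨s, hs, r, hr, rfl⟩
      exact ⟨r, hr, s, hs, by ring⟩

-- func_raises: the crash-fix claim (A raises IndexError on empty T1; B returns 0 there)
@[simp]
theorem func_raises : Claim_raises_func := by
  unfold Claim_raises_func
  exact ⟨fun T1 T2 _ hr hp => hp.1 hr, by decide⟩
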